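-- pv_equiv track=rewrite | github.com/svenwelink/AdventOfCode | 2025/day02.py | isValidXTimes
-- ===== SOURCE A (Python) =====
-- def isValidXTimes(idString, x):
--     if len(idString) % x == 0 and len(idString) >= x:
--         lengthSlices = int(len(idString) / x)
--         for i in range(x - 1):
--             if idString[int(i * lengthSlices):int((i + 1) * lengthSlices)] != idString[int((i + 1) * lengthSlices):int((i + 2) * lengthSlices)]:
--                 return False
--
--         return True
--     return False
-- ===== SOURCE B (Python) =====
-- def isValidXTimes(idString, x):
--     if len(idString) % x != 0 or len(idString) < x:
--         return False
--     L = len(idString) // x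
--     return len({idString[i * L:(i + 1) * L] for i in range(x)}) <= 1
-- ===== Notes on version B (the rewrite author's own statement) =====
-- stated objective: simpler
-- what changed: Replaces the pairwise adjacent-slice comparison loop with collecting all x slices into a set and testing that it has at most one element.
import Mathlib
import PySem

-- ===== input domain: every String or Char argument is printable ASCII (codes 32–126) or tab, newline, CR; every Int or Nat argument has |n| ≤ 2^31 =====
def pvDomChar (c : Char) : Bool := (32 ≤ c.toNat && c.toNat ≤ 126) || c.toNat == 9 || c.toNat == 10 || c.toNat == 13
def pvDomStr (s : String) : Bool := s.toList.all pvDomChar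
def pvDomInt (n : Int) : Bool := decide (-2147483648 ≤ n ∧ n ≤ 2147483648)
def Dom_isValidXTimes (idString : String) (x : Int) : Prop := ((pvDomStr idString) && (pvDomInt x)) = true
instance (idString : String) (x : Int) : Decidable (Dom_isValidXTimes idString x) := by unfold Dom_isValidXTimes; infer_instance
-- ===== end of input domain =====

-- B replaces A's adjacent-pair slice comparison loop with collecting all x slices into a set
-- and testing that the set has at most one element (same cost, simpler shape).

-- ===== PORT A =====
def isValidXTimes (idString : String) (x : Int) : Bool :=
  if PySem.Int.mod (PySem.Str.len idString) x = 0 ∧ x ≤ PySem.Str.len idString then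
    -- int(len(idString) / x): truncating division, exact on Dom (|len|, |x| < 2^53)
    let lengthSlices : Int := PySem.Int.truncdiv (PySem.Str.len idString) x
    (PySem.List.pyRange 0 (x - 1) 1).all (fun i =>
      PySem.Str.slice idString (some (i * lengthSlices)) (some ((i + 1) * lengthSlices))
        == PySem.Str.slice idString (some ((i + 1) * lengthSlices)) (some ((i + 2) * lengthSlices)))
  else false

-- ===== PORT B =====
def isValidXTimes_alt (idString : String) (x : Int) : Bool :=
  if PySem.Int.mod (PySem.Str.len idString) x ≠ 0 ∨ PySem.Str.len idString < x then false
  else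
    let L : Int := PySem.Int.floordiv (PySem.Str.len idString) x
    decide (PySem.Set.len (PySem.Set.ofList ((PySem.List.pyRange 0 x 1).map (fun i =>
      PySem.Str.slice idString (some (i * L)) (some ((i + 1) * L))))) ≤ 1)

-- ===== PRECONDITION & SPEC =====
-- Pre_ excludes only x = 0, on which Python A raises ZeroDivisionError in 'len(idString) % x'.
def Pre_isValidXTimes (idString : String) (x : Int) : Prop := x ≠ 0
instance (idString : String) (x : Int) : Decidable (Pre_isValidXTimes idString x) := by unfold Pre_isValidXTimes; infer_instance
def pvWitness_isValidXTimes : String × Int := ("abab", 2)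

def Spec_isValidXTimes (idString : String) (x : Int) (out : Bool) : Prop := out = isValidXTimes_alt idString x
instance (idString : String) (x : Int) (out : Bool) : Decidable (Spec_isValidXTimes idString x out) := by unfold Spec_isValidXTimes; infer_instance

-- ===== CLAIM (what is proved, stated in full; the proofs are below) =====
def Claim_equal_isValidXTimes : Prop := ∀ (idString : String) (x : Int), Dom_isValidXTimes idString x → Pre_isValidXTimes idString x → Spec_isValidXTimes idString x (isValidXTimes idString x)

-- ===== LEMMAS AND PROOFS =====

-- the adjacent-pair chain g 0 = g 1 = … = g m is the same as all of g 0 … g m being one value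
theorem chain_iff_allEq {α : Type} (g : Nat → α) (m : Nat) :
    (∀ j < m, g j = g (j + 1)) ↔
      (∀ a ∈ (List.range (m + 1)).map g, ∀ b ∈ (List.range (m + 1)).map g, a = b) := by
  constructor
  · intro h
    have hbase : ∀ j, j ≤ m → g j = g 0 := by
      intro j hj
      induction j with
      | zero => rfl
      | succ k ih =>
        have hk : k < m := by omega
        exact ((h k hk).symm).trans (ih (by omega))
    intro a ha b hb
    simp only [List.mem_map, List.mem_range] at ha hb
    obtain ⟨j, hj, rfl⟩ := ha
    obtain ⟨k, hk, rfl⟩ := hb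
    rw [hbase j (by omega), hbase k (by omega)]
  · intro h j hj
    exact h (g j) (by simp only [List.mem_map, List.mem_range]; exact ⟨j, by omega, rfl⟩)
      (g (j + 1)) (by simp only [List.mem_map, List.mem_range]; exact ⟨j + 1, by omega, rfl⟩)

-- set(l) has at most one element iff all elements of l are equal
theorem setLen_le_one_iff {α : Type} [BEq α] [LawfulBEq α] (l : List α) :
    PySem.Set.len (PySem.Set.ofList l) ≤ 1 ↔ ∀ a ∈ l, ∀ b ∈ l, a = b := by
  have hnd := PySem.Set.nodup_ofList l
  have hmem := PySem.Set.mem_ofList l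
  constructor
  · intro h a ha b hb
    have ha' : a ∈ PySem.Set.ofList l := (hmem a).mpr ha
    have hb' : b ∈ PySem.Set.ofList l := (hmem b).mpr hb
    match hd : PySem.Set.ofList l with
    | [] => rw [hd] at ha'; cases ha'
    | [c] =>
      rw [hd] at ha' hb'
      simp only [List.mem_singleton] at ha' hb'
      rw [ha', hb']
    | c :: d :: t =>
      exfalso
      rw [hd] at h
      simp only [PySem.Set.len, List.length_cons] at h
      omega
  · intro h
    match hd : PySem.Set.ofList l with
    | [] => simp [PySem.Set.len]
    | [c] => simp [PySem.Set.len]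
    | c :: d :: t =>
      exfalso
      have hc : c ∈ l := (hmem c).mp (by rw [hd]; simp)
      have hdm : d ∈ l := (hmem d).mp (by rw [hd]; simp)
      have : c = d := h c hc d hdm
      rw [hd] at hnd
      exact (List.nodup_cons.mp hnd).1 (by rw [this]; simp)

-- ===== VERDICT =====
theorem isValidXTimes_spec : Claim_equal_isValidXTimes := by
  intro s x _hdom hx
  unfold Spec_isValidXTimes isValidXTimes isValidXTimes_alt
  by_cases hg : PySem.Int.mod (PySem.Str.len s) x = 0 ∧ x ≤ PySem.Str.len s
  · rw [if_pos hg, if_neg (by push Not; omega)]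
    obtain ⟨hmod, hge⟩ := hg
    have hdvd : x ∣ PySem.Str.len s := (PySem.Int.mod_eq_zero_iff_dvd _ _).mp hmod
    rcases lt_or_gt_of_ne hx with hneg | hpos
    · -- x < 0 : both ranges are empty
      have h0 : x.toNat = 0 := Int.toNat_of_nonpos (by omega)
      simp [PySem.List.pyRange_one, h0, PySem.Set.ofList, PySem.Set.len]
    · -- x > 0
      have hL : PySem.Int.truncdiv (PySem.Str.len s) x = PySem.Int.floordiv (PySem.Str.len s) x := by
        rw [PySem.Int.floordiv_eq_ediv_of_pos hpos]
        exact Int.tdiv_eq_ediv_of_dvd hdvd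
      rw [hL]
      set L := PySem.Int.floordiv (PySem.Str.len s) x with hLdef
      set f : Int → String := fun i =>
        PySem.Str.slice s (some (i * L)) (some ((i + 1) * L)) with hfdef
      obtain ⟨m, hm⟩ : ∃ m : Nat, x = (m : Int) + 1 :=
        ⟨(x - 1).toNat, by omega⟩
      have h1 : (x - 1 - 0).toNat = m := by omega
      have h2 : (x - 0).toNat = m + 1 := by omega
      rw [Bool.eq_iff_iff]
      simp only [PySem.List.pyRange_one, h1, h2, List.all_map, List.all_eq_true,
        Function.comp, beq_iff_eq, decide_eq_true_eq, List.map_map]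
      have hmap : (List.range (m + 1)).map ((fun i => f i) ∘ fun k : Nat => (0 : Int) + ↑k)
          = (List.range (m + 1)).map (fun j : Nat => f ↑j) := by
        apply List.map_congr_left; intro j _; simp
      rw [hmap, setLen_le_one_iff]
      rw [← chain_iff_allEq (fun j : Nat => f ↑j) m]
      constructor
      · intro h j hj
        have := h j (List.mem_range.mpr hj)
        simpa [add_comm, Nat.cast_add] using this
      · intro h j hj
        have := h j (List.mem_range.mp hj)
        simpa [add_comm, Nat.cast_add] using this
  · have hcond : PySem.Int.mod (PySem.Str.len s) x ≠ 0 ∨ PySem.Str.len s < x := by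
      push Not at hg
      by_cases hm : PySem.Int.mod (PySem.Str.len s) x = 0
      · exact Or.inr (hg hm)
      · exact Or.inl hm
    rw [if_neg hg, if_pos hcond]
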